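-- pv_equiv track=rewrite | github.com/Airlectric/A2SV_Competitive_Programming | codeforces/B_Lucky_Numbers_easy.py | superLucky
-- ===== SOURCE A (Python) =====
-- from collections import Counter
--
-- def superLucky(num):
--     mock = ['4','4','7']
--     detect = Counter(mock)
--     num_str = ''
--     while detect['4'] != detect['7'] or len(num_str) != detect['4']+detect['7']:
--
--         num_str = str(num)
--
--         detect = Counter(map(str,num_str))
--
--         num += 1
--
--     return num-1
-- ===== SOURCE B (Python) =====
-- def superLucky(num):
--     # Generate balanced 4/7 numbers per even length, return the smallest >= num.
--     def gen(n4, n7, acc):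
--         if n4 == 0 and n7 == 0:
--             return [acc]
--         out = []
--         if n4 > 0:
--             out += gen(n4 - 1, n7, acc * 10 + 4)
--         if n7 > 0:
--             out += gen(n4, n7 - 1, acc * 10 + 7)
--         return out
--
--     k = 1
--     while True:
--         cands = [c for c in gen(k, k, 0) if c >= num]
--         if cands:
--             return min(cands)
--         k += 1
-- ===== Notes on version B (the rewrite author's own statement) =====
-- stated objective: faster
-- what changed: Instead of A's upward scan that tests every successive integer by counting its string digits, B directly generates, length by length, the numbers whose decimal digits are equally many fours and sevens, and returns the smallest generated number that is at least num.
import Mathlib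
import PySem

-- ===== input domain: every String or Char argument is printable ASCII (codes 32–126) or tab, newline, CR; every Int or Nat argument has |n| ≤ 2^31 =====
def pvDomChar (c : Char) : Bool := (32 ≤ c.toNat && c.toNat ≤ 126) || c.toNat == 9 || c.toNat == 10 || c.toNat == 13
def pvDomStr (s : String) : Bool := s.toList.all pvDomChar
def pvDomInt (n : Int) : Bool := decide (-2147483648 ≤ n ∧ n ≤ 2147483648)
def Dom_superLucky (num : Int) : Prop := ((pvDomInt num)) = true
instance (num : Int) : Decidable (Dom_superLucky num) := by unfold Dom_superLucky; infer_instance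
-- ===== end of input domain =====

-- B replaces A's one-by-one upward scan with direct generation, length by length, of the
-- numbers written with equally many fours and sevens, returning the smallest one ≥ num
-- (objective: faster, measured).

-- ===== PORT A =====
-- the loop-continue condition `detect['4'] != detect['7'] or len(num_str) != detect['4']+detect['7']`
def pvCond (num_str : List Char) (detect : PySem.Dict String Int) : Bool :=
  detect.getD "4" 0 != detect.getD "7" 0 ||
    (num_str.length : Int) != detect.getD "4" 0 + detect.getD "7" 0

-- A's `while` loop; the Nat fuel only makes the recursion total (never exhausted on Dom).
def pvLoopA : Nat → Int → List Char → PySem.Dict String Int → Int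
  | fuel, num, num_str, detect =>
  if pvCond num_str detect then
    match fuel with
    | 0 => num - 1
    | f + 1 =>
        pvLoopA f (num + 1) (PySem.Int.toChars num)
          (PySem.Dict.counter ((PySem.Int.toChars num).map fun c => String.ofList [c]))
  else
    num - 1

def superLucky (num : Int) : Int :=
  -- mock = ['4','4','7']; detect = Counter(mock); num_str = ''
  pvLoopA ((4444477777 - num).toNat + 1) num []
    (PySem.Dict.counter ["4", "4", "7"])

-- ===== PORT B =====
-- gen(n4, n7, acc) from Source B; the structural Nat fuel (= n4 + n7 at every call) is only for totality.
def pvGenAux : Nat → Nat → Nat → Nat → List Nat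
  | fuel, n4, n7, acc =>
    if n4 = 0 ∧ n7 = 0 then [acc]
    else
      match fuel with
      | 0 => []
      | f + 1 =>
          (if 0 < n4 then pvGenAux f (n4 - 1) n7 (acc * 10 + 4) else []) ++
          (if 0 < n7 then pvGenAux f n4 (n7 - 1) (acc * 10 + 7) else [])

def pvGen (n4 n7 acc : Nat) : List Nat := pvGenAux (n4 + n7) n4 n7 acc

-- the `while True:` loop over k = 1, 2, …; the Nat fuel only makes the recursion total.
def pvLoopB : Nat → Nat → Int → Int
  | 0, _, _ => 0
  | f + 1, k, num =>
    match ((pvGen k k 0).filter fun (c : Nat) => decide (num ≤ (c : Int))).min? with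
    | some m => (m : Int)
    | none => pvLoopB f (k + 1) num

def superLucky_alt (num : Int) : Int :=
  pvLoopB ((PySem.Int.toChars num).length + 2) 1 num

-- ===== PRECONDITION & SPEC =====
def Spec_superLucky (num : Int) (out : Int) : Prop := out = superLucky_alt num
instance (num : Int) (out : Int) : Decidable (Spec_superLucky num out) := by
  unfold Spec_superLucky; infer_instance

-- ===== CLAIM =====
def Claim_equal_superLucky : Prop :=
  ∀ (num : Int), Dom_superLucky num → Spec_superLucky num (superLucky num)

-- ===== LEMMAS AND PROOFS =====

/-- "m is super-lucky": its decimal digits are only 4s and 7s, equally many of each. -/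
def pvSL (m : Nat) : Prop :=
  m ≠ 0 ∧ (∀ d ∈ Nat.digits 10 m, d = 4 ∨ d = 7) ∧
    (Nat.digits 10 m).count 4 = (Nat.digits 10 m).count 7

lemma pvLen47 {l : List Nat} (h : ∀ d ∈ l, d = 4 ∨ d = 7) :
    l.count 4 + l.count 7 = l.length := by
  induction l with
  | nil => simp
  | cons a l ih =>
    have ih' := ih fun d hd => h d (List.mem_cons_of_mem _ hd)
    rcases h a (by simp) with rfl | rfl <;> simp <;> omega

lemma pvCountTwo {α} [DecidableEq α] (a b : α) (hab : a ≠ b) (l : List α) :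
    l.count a + l.count b ≤ l.length := by
  induction l with
  | nil => simp
  | cons x l ih =>
    simp only [List.count_cons, List.length_cons]
    by_cases h1 : x = a <;> by_cases h2 : x = b
    · exact absurd (h1.symm.trans h2) hab
    · simp only [h1]
      simp [hab]
      omega
    · simp only [h2]
      simp [Ne.symm hab]
      omega
    · simp [h1, h2]
      omega

lemma pvAll47 {l : List Nat} : l.count 4 + l.count 7 = l.length → ∀ d ∈ l, d = 4 ∨ d = 7 := by
  induction l with
  | nil => simp
  | cons a l ih =>
    intro h d hd
    have hle := pvCountTwo 4 7 (by decide) l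
    by_cases ha4 : a = 4 <;> by_cases ha7 : a = 7
    · exact absurd (ha4.symm.trans ha7) (by decide)
    · simp [ha4] at h
      rcases List.mem_cons.mp hd with rfl | hd'
      · exact Or.inl ha4
      · exact ih (by omega) d hd'
    · simp [ha7] at h
      rcases List.mem_cons.mp hd with rfl | hd'
      · exact Or.inr ha7
      · exact ih (by omega) d hd'
    · exfalso
      simp [ha4, ha7] at h
      omega

lemma pvCountChar (l : List Nat) (hl : ∀ d ∈ l, d < 10) (a : Nat) (ha : a < 10) :
    (l.map Nat.digitChar).count (Nat.digitChar a) = l.count a := by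
  induction l with
  | nil => simp
  | cons d l ih =>
    have hd : d < 10 := hl d (by simp)
    have ih' := ih fun x hx => hl x (List.mem_cons_of_mem _ hx)
    have hiff : Nat.digitChar d = Nat.digitChar a ↔ d = a := by
      interval_cases d <;> interval_cases a <;> decide
    by_cases h : d = a
    · subst h; simp [ih']
    · have hne : Nat.digitChar d ≠ Nat.digitChar a := fun hc => h (hiff.mp hc)
      simp [ih', h, hne]

lemma pvToDigitsCore (n : Nat) : ∀ (f : Nat) (acc : List Char), 0 < n → n ≤ f →
    Nat.toDigitsCore 10 f n acc = ((Nat.digits 10 n).map Nat.digitChar).reverse ++ acc := by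
  induction n using Nat.strong_induction_on with
  | _ n ih =>
    intro f acc hn hf
    match f with
    | 0 => omega
    | f + 1 =>
      rw [Nat.toDigitsCore]
      have hdig := Nat.digits_def' (by norm_num : (1:ℕ) < 10) hn
      by_cases h0 : n / 10 = 0
      · simp only [h0, if_true]
        rw [hdig, h0]
        simp
      · simp only [h0, if_false]
        have hlt : n / 10 < n := Nat.div_lt_self hn (by norm_num)
        rw [ih (n / 10) hlt f _ (Nat.pos_of_ne_zero h0) (by omega)]
        rw [hdig]
        simp

lemma pvToCharsPos (n : Int) (h : 0 < n) :
    PySem.Int.toChars n = ((Nat.digits 10 n.toNat).map Nat.digitChar).reverse := by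
  have h1 : ¬ n < 0 := by omega
  rw [PySem.Int.toChars]
  simp only [h1, if_false]
  rw [Nat.toDigits, pvToDigitsCore n.toNat (n.toNat + 1) [] (by omega) (by omega)]
  simp

lemma pvOfListInj : Function.Injective (fun c : Char => String.ofList [c]) := by
  intro x y h
  have := congrArg String.toList h
  simpa [String.toList_ofList] using this

lemma pvCountMapStr (s : List Char) (c : Char) :
    (s.map fun x => String.ofList [x]).count (String.ofList [c]) = s.count c :=
  List.count_map_of_injective _ _ pvOfListInj _

lemma pvCondState (j : Int) :
    pvCond (PySem.Int.toChars j)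
      (PySem.Dict.counter ((PySem.Int.toChars j).map fun c => String.ofList [c])) = false
    ↔ (0 < j ∧ pvSL j.toNat) := by
  have e4 : (PySem.Dict.counter ((PySem.Int.toChars j).map fun c => String.ofList [c])).getD "4" 0
      = ((PySem.Int.toChars j).count '4' : Int) := by
    rw [show ("4" : String) = String.ofList ['4'] from rfl, PySem.Dict.getD_counter, pvCountMapStr]
  have e7 : (PySem.Dict.counter ((PySem.Int.toChars j).map fun c => String.ofList [c])).getD "7" 0
      = ((PySem.Int.toChars j).count '7' : Int) := by
    rw [show ("7" : String) = String.ofList ['7'] from rfl, PySem.Dict.getD_counter, pvCountMapStr]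
  have hiff : pvCond (PySem.Int.toChars j)
      (PySem.Dict.counter ((PySem.Int.toChars j).map fun c => String.ofList [c])) = false
      ↔ ((PySem.Int.toChars j).count '4' = (PySem.Int.toChars j).count '7' ∧
          (PySem.Int.toChars j).length
            = (PySem.Int.toChars j).count '4' + (PySem.Int.toChars j).count '7') := by
    rw [pvCond, e4, e7]
    simp only [Bool.or_eq_false_iff, bne_eq_false_iff_eq]
    constructor
    · rintro ⟨h1, h2⟩; exact ⟨by exact_mod_cast h1, by exact_mod_cast h2⟩
    · rintro ⟨h1, h2⟩; exact ⟨by exact_mod_cast h1, by exact_mod_cast h2⟩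
  rw [hiff]
  rcases lt_trichotomy j 0 with hj | hj | hj
  · -- negative: the leading '-' makes the length test fail
    have hs : PySem.Int.toChars j = '-' :: Nat.toDigits 10 j.natAbs := by
      rw [PySem.Int.toChars]; simp [hj]
    rw [hs]
    have hle := pvCountTwo '4' '7' (by decide) (Nat.toDigits 10 j.natAbs)
    constructor
    · rintro ⟨h1, h2⟩
      simp only [List.count_cons, List.length_cons] at h1 h2
      simp at h1 h2
      omega
    · rintro ⟨h0, _⟩; omega
  · subst hj
    exact iff_of_false (by decide) (by simp)
  · have hm0 : j.toNat ≠ 0 := by omega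
    have hs := pvToCharsPos j hj
    have hlt : ∀ d ∈ Nat.digits 10 j.toNat, d < 10 := fun d hd =>
      Nat.digits_lt_base (by norm_num) hd
    have c4 : (PySem.Int.toChars j).count '4' = (Nat.digits 10 j.toNat).count 4 := by
      rw [hs, List.count_reverse,
        show '4' = Nat.digitChar 4 from rfl, pvCountChar _ hlt 4 (by norm_num)]
    have c7 : (PySem.Int.toChars j).count '7' = (Nat.digits 10 j.toNat).count 7 := by
      rw [hs, List.count_reverse,
        show '7' = Nat.digitChar 7 from rfl, pvCountChar _ hlt 7 (by norm_num)]
    have clen : (PySem.Int.toChars j).length = (Nat.digits 10 j.toNat).length := by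
      rw [hs]; simp
    rw [c4, c7, clen]
    constructor
    · rintro ⟨h1, h2⟩
      exact ⟨hj, hm0, pvAll47 (by omega), h1⟩
    · rintro ⟨-, -, hall, hcc⟩
      have := pvLen47 hall
      exact ⟨hcc, by omega⟩

lemma pvLoopA_stop (fuel : Nat) (num : Int) (s : List Char) (d : PySem.Dict String Int)
    (h : pvCond s d = false) : pvLoopA fuel num s d = num - 1 := by
  cases fuel <;> rw [pvLoopA] <;> rw [if_neg (by simp [h])]

lemma pvLoopA_run : ∀ (fuel : Nat) (n m : Int) (s : List Char) (d : PySem.Dict String Int),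
    n ≤ m → (0 < m ∧ pvSL m.toNat) →
    (∀ j : Int, n ≤ j → j < m → ¬ (0 < j ∧ pvSL j.toNat)) →
    (m - n).toNat < fuel → pvCond s d = true →
    pvLoopA fuel n s d = m := by
  intro fuel
  induction fuel with
  | zero => intro n m s d hnm _ _ hf _; omega
  | succ f ih =>
    intro n m s d hnm hm hmin hf hcond
    rw [pvLoopA, if_pos hcond]
    show pvLoopA f (n + 1) (PySem.Int.toChars n)
        (PySem.Dict.counter ((PySem.Int.toChars n).map fun c => String.ofList [c])) = m
    rcases eq_or_lt_of_le hnm with rfl | hlt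
    · have hc := (pvCondState n).mpr hm
      rw [pvLoopA_stop _ _ _ _ hc]
      omega
    · have hok := hmin n le_rfl hlt
      have hc : pvCond (PySem.Int.toChars n)
          (PySem.Dict.counter ((PySem.Int.toChars n).map fun c => String.ofList [c])) = true := by
        cases h : pvCond (PySem.Int.toChars n)
            (PySem.Dict.counter ((PySem.Int.toChars n).map fun c => String.ofList [c])) with
        | false => exact absurd ((pvCondState n).mp h) hok
        | true => rfl
      exact ih (n + 1) m _ _ (by omega) hm (fun j hj hjm => hmin j (by omega) hjm)
        (by omega) hc

lemma pvDigitsConsD (acc d : Nat) (hd : 0 < d) (hd10 : d < 10) :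
    Nat.digits 10 (acc * 10 + d) = d :: Nat.digits 10 acc := by
  rw [Nat.digits_def' (by norm_num : (1:ℕ) < 10) (by omega)]
  congr 1
  · omega
  · congr 1; omega

lemma pvGenExZero (acc m : Nat) :
    (∃ ds : List Nat, (∀ d ∈ ds, d = 4 ∨ d = 7) ∧ ds.count 4 = 0 ∧ ds.count 7 = 0 ∧
      Nat.digits 10 m = ds ++ Nat.digits 10 acc) ↔ m = acc := by
  constructor
  · rintro ⟨ds, hall, h4, h7, hdig⟩
    have hlen := pvLen47 hall
    have hnil : ds = [] := List.eq_nil_of_length_eq_zero (by omega)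
    subst hnil
    simp only [List.nil_append] at hdig
    have := congrArg (Nat.ofDigits 10) hdig
    simpa [Nat.ofDigits_digits] using this
  · rintro rfl
    exact ⟨[], by simp, by simp, by simp, by simp⟩

lemma pvGenAux_mem : ∀ (fuel n4 n7 acc m : Nat), n4 + n7 ≤ fuel →
    (m ∈ pvGenAux fuel n4 n7 acc ↔
      ∃ ds : List Nat, (∀ d ∈ ds, d = 4 ∨ d = 7) ∧ ds.count 4 = n4 ∧ ds.count 7 = n7 ∧
        Nat.digits 10 m = ds ++ Nat.digits 10 acc) := by
  intro fuel
  induction fuel with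
  | zero =>
    intro n4 n7 acc m hle
    obtain rfl : n4 = 0 := by omega
    obtain rfl : n7 = 0 := by omega
    rw [pvGenAux, if_pos ⟨rfl, rfl⟩]
    rw [pvGenExZero]
    simp
  | succ f ih =>
    intro n4 n7 acc m hle
    by_cases h0 : n4 = 0 ∧ n7 = 0
    · obtain ⟨rfl, rfl⟩ := h0
      rw [pvGenAux, if_pos ⟨rfl, rfl⟩, pvGenExZero]
      simp
    · rw [pvGenAux, if_neg h0]
      simp only [List.mem_append]
      constructor
      · rintro (hm | hm)
        · by_cases hn4 : 0 < n4
          · rw [if_pos hn4] at hm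
            obtain ⟨ds', hall, h4, h7, hdig⟩ := (ih (n4 - 1) n7 (acc * 10 + 4) m (by omega)).mp hm
            refine ⟨ds' ++ [4], ?_, ?_, ?_, ?_⟩
            · intro d hd
              rcases List.mem_append.mp hd with h | h
              · exact hall d h
              · simp at h; subst h; exact Or.inl rfl
            · simp [List.count_append]; omega
            · simp [List.count_append]; omega
            · rw [hdig, pvDigitsConsD acc 4 (by norm_num) (by norm_num)]
              simp
          · rw [if_neg hn4] at hm; simp at hm
        · by_cases hn7 : 0 < n7
          · rw [if_pos hn7] at hm
            obtain ⟨ds', hall, h4, h7, hdig⟩ := (ih n4 (n7 - 1) (acc * 10 + 7) m (by omega)).mp hm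
            refine ⟨ds' ++ [7], ?_, ?_, ?_, ?_⟩
            · intro d hd
              rcases List.mem_append.mp hd with h | h
              · exact hall d h
              · simp at h; subst h; exact Or.inr rfl
            · simp [List.count_append]; omega
            · simp [List.count_append]; omega
            · rw [hdig, pvDigitsConsD acc 7 (by norm_num) (by norm_num)]
              simp
          · rw [if_neg hn7] at hm; simp at hm
      · rintro ⟨ds, hall, h4, h7, hdig⟩
        have hne : ds ≠ [] := by
          intro h; subst h; simp at h4 h7; exact h0 ⟨h4.symm, h7.symm⟩
        obtain ⟨ds', d, rfl⟩ := (List.eq_nil_or_concat ds).resolve_left hne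
        simp only [List.concat_eq_append] at *
        have hd47 : d = 4 ∨ d = 7 := hall d (by simp)
        rcases hd47 with rfl | rfl
        · have hn4 : 0 < n4 := by simp [List.count_append] at h4; omega
          left
          rw [if_pos hn4]
          refine (ih (n4 - 1) n7 (acc * 10 + 4) m (by omega)).mpr
            ⟨ds', fun x hx => hall x (List.mem_append_left _ hx), ?_, ?_, ?_⟩
          · simp [List.count_append] at h4; omega
          · simp [List.count_append] at h7; omega
          · rw [hdig, pvDigitsConsD acc 4 (by norm_num) (by norm_num)]
            simp
        · have hn7 : 0 < n7 := by simp [List.count_append] at h7; omega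
          right
          rw [if_pos hn7]
          refine (ih n4 (n7 - 1) (acc * 10 + 7) m (by omega)).mpr
            ⟨ds', fun x hx => hall x (List.mem_append_left _ hx), ?_, ?_, ?_⟩
          · simp [List.count_append] at h4; omega
          · simp [List.count_append] at h7; omega
          · rw [hdig, pvDigitsConsD acc 7 (by norm_num) (by norm_num)]
            simp

lemma pvGen_mem (k m : Nat) (hk : 0 < k) :
    m ∈ pvGen k k 0 ↔ pvSL m ∧ (Nat.digits 10 m).length = 2 * k := by
  rw [pvGen, pvGenAux_mem (k + k) k k 0 m le_rfl]
  constructor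
  · rintro ⟨ds, hall, h4, h7, hdig⟩
    simp only [Nat.digits_zero, List.append_nil] at hdig
    have hlen := pvLen47 hall
    have hm0 : m ≠ 0 := by
      intro h; subst h
      simp only [Nat.digits_zero] at hdig
      rw [← hdig] at hlen h4
      simp at hlen h4
      omega
    refine ⟨⟨hm0, by rw [hdig]; exact hall, by rw [hdig]; omega⟩, by rw [hdig]; omega⟩
  · rintro ⟨⟨hm0, hall, hcc⟩, hlen⟩
    have := pvLen47 hall
    exact ⟨Nat.digits 10 m, hall, by omega, by omega, by simp⟩

lemma pvGenAux_ne_nil : ∀ (fuel n4 n7 acc : Nat), n4 + n7 ≤ fuel →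
    pvGenAux fuel n4 n7 acc ≠ [] := by
  intro fuel
  induction fuel with
  | zero =>
    intro n4 n7 acc h
    obtain rfl : n4 = 0 := by omega
    obtain rfl : n7 = 0 := by omega
    rw [pvGenAux, if_pos ⟨rfl, rfl⟩]
    simp
  | succ f ih =>
    intro n4 n7 acc h
    by_cases h0 : n4 = 0 ∧ n7 = 0
    · rw [pvGenAux, if_pos h0]; simp
    · rw [pvGenAux, if_neg h0]
      intro hnil
      rw [List.append_eq_nil_iff] at hnil
      by_cases h4 : 0 < n4
      · rw [if_pos h4] at hnil
        exact ih (n4 - 1) n7 (acc * 10 + 4) (by omega) hnil.1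
      · have h7 : 0 < n7 := by omega
        rw [if_pos h7] at hnil
        exact ih n4 (n7 - 1) (acc * 10 + 7) (by omega) hnil.2

lemma pvLoopB_run (num : Int) (M K : Nat)
    (hM : pvSL M) (hge : num ≤ (M : Int))
    (hmin : ∀ c : Nat, pvSL c → num ≤ (c : Int) → M ≤ c)
    (hK : (Nat.digits 10 M).length = 2 * K) :
    ∀ (fuel k : Nat), 0 < k → k ≤ K → K - k < fuel → pvLoopB fuel k num = (M : Int) := by
  intro fuel
  induction fuel with
  | zero => intro k h1 h2 h3; omega
  | succ f ih =>
    intro k hk hkK hf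
    rw [pvLoopB]
    rcases eq_or_lt_of_le hkK with rfl | hlt
    · have hsome : ((pvGen k k 0).filter fun (c : Nat) => decide (num ≤ (c : Int))).min? = some M := by
        rw [List.min?_eq_some_iff]
        constructor
        · rw [List.mem_filter]
          exact ⟨(pvGen_mem k M hk).mpr ⟨hM, hK⟩, by simpa using hge⟩
        · intro b hb
          rw [List.mem_filter] at hb
          have hb1 := (pvGen_mem k b hk).mp hb.1
          exact hmin b hb1.1 (by simpa using hb.2)
      rw [hsome]
    · have hemp : (pvGen k k 0).filter (fun (c : Nat) => decide (num ≤ (c : Int))) = [] := by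
        rw [List.filter_eq_nil_iff]
        intro c hc hnc
        simp only [decide_eq_true_eq] at hnc
        have hcb := (pvGen_mem k c hk).mp hc
        have hMc := hmin c hcb.1 hnc
        have hub : c < 10 ^ (2 * k) := by
          have := Nat.lt_base_pow_length_digits (b := 10) (m := c) (by norm_num)
          rwa [hcb.2] at this
        have hlb : 10 ^ (2 * K - 1) ≤ M := by
          have := (Nat.lt_digits_length_iff (b := 10) (k := 2 * K - 1) (by norm_num) M).mp
            (by rw [hK]; omega)
          exact this
        have hmono : (10 : Nat) ^ (2 * k) ≤ 10 ^ (2 * K - 1) :=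
          Nat.pow_le_pow_right (by norm_num) (by omega)
        omega
      rw [hemp]
      simp only [List.min?_nil]
      exact ih (k + 1) (by omega) (by omega) (by omega)

lemma pvSL47 : pvSL 47 := by
  have h : Nat.digits 10 47 = [7, 4] := by norm_num
  refine ⟨by norm_num, ?_, ?_⟩ <;> rw [h] <;> decide

lemma pvSLBig : pvSL 4444477777 := by
  have h : Nat.digits 10 4444477777 = [7, 7, 7, 7, 7, 4, 4, 4, 4, 4] := by norm_num
  refine ⟨by norm_num, ?_, ?_⟩ <;> rw [h] <;> decide

-- ===== VERDICT =====
theorem superLucky_spec : Claim_equal_superLucky := by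
  unfold Claim_equal_superLucky Spec_superLucky
  intro num hdom
  have hdom' : -2147483648 ≤ num ∧ num ≤ 2147483648 := by
    unfold Dom_superLucky pvDomInt at hdom
    exact of_decide_eq_true hdom
  haveI hdec : DecidablePred (fun m : Nat => pvSL m ∧ num ≤ (m : Int)) := fun m => by
    unfold pvSL; infer_instance
  have hex : ∃ m : Nat, pvSL m ∧ num ≤ (m : Int) :=
    ⟨4444477777, pvSLBig, by push_cast; omega⟩
  obtain ⟨hMSL, hMge⟩ := Nat.find_spec hex
  set M := Nat.find hex with hMdef
  have hMmin : ∀ c : Nat, pvSL c → num ≤ (c : Int) → M ≤ c := fun c h1 h2 =>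
    Nat.find_min' hex ⟨h1, h2⟩
  have hMle : M ≤ 4444477777 := Nat.find_min' hex ⟨pvSLBig, by push_cast; omega⟩
  have hlen47 := pvLen47 hMSL.2.1
  set K := (Nat.digits 10 M).count 4 with hKdef
  have hcc := hMSL.2.2
  have hK : (Nat.digits 10 M).length = 2 * K := by omega
  have hKpos : 0 < K := by
    have hne : Nat.digits 10 M ≠ [] := Nat.digits_ne_nil_iff_ne_zero.mpr hMSL.1
    have hl0 : 0 < (Nat.digits 10 M).length := List.length_pos_iff.mpr hne
    omega
  have hA : superLucky num = (M : Int) := by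
    unfold superLucky
    apply pvLoopA_run
    · exact hMge
    · refine ⟨by exact_mod_cast Nat.pos_of_ne_zero hMSL.1, ?_⟩
      simpa using hMSL
    · intro j hj hjm hok
      obtain ⟨hj0, hjSL⟩ := hok
      have hjc : ((j.toNat : Nat) : Int) = j := Int.toNat_of_nonneg (by omega)
      have h1 : M ≤ j.toNat := hMmin j.toNat hjSL (by rw [hjc]; exact hj)
      have h2 : (M : Int) ≤ j := by rw [← hjc]; exact_mod_cast h1
      omega
    · have h1 : (M : Int) ≤ 4444477777 := by exact_mod_cast hMle
      omega
    · decide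
  have hKb : K ≤ (PySem.Int.toChars num).length + 2 := by
    by_cases hnum : num ≤ 47
    · have hM47 : M ≤ 47 := Nat.find_min' hex ⟨pvSL47, by push_cast; omega⟩
      have : (Nat.digits 10 M).length ≤ 2 :=
        (Nat.digits_length_le_iff (by norm_num) M).mpr (by omega)
      omega
    · have hpos : 0 < num := by omega
      have htc := pvToCharsPos num hpos
      have hdlen : (PySem.Int.toChars num).length = (Nat.digits 10 num.toNat).length := by
        rw [htc]; simp
      set d := (Nat.digits 10 num.toNat).length with hddef
      have hnum_lt : num.toNat < 10 ^ d :=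
        Nat.lt_base_pow_length_digits (by norm_num)
      have hd1 : 0 < d := by
        have hne : Nat.digits 10 num.toNat ≠ [] :=
          Nat.digits_ne_nil_iff_ne_zero.mpr (by omega)
        have := List.length_pos_iff.mpr hne
        omega
      obtain ⟨c, hc⟩ : ∃ c, c ∈ pvGen d d 0 :=
        List.exists_mem_of_ne_nil _ (pvGenAux_ne_nil (d + d) d d 0 le_rfl)
      have hcb := (pvGen_mem d c hd1).mp hc
      have hclb : 10 ^ (2 * d - 1) ≤ c :=
        (Nat.lt_digits_length_iff (by norm_num) c).mp (by rw [hcb.2]; omega)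
      have hpow : (10 : Nat) ^ d ≤ 10 ^ (2 * d - 1) :=
        Nat.pow_le_pow_right (by norm_num) (by omega)
      have hcge : num ≤ (c : Int) := by
        have h1 : num.toNat < c := by omega
        omega
      have hMc : M ≤ c := hMmin c hcb.1 hcge
      have hll := Nat.le_length_digits_le 10 M c hMc
      rw [hK, hcb.2] at hll
      omega
  have hB : superLucky_alt num = (M : Int) := by
    unfold superLucky_alt
    exact pvLoopB_run num M K hMSL hMge hMmin hK _ 1 (by norm_num) hKpos (by omega)
  rw [hA, hB]
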